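-- pv_equiv track=rewrite | github.com/Hyphonic/Conquest | scripts/Spritesheet2Bitmap.py | GenerateCharacterGrid
-- ===== SOURCE A (Python) =====
-- def GenerateCharacterGrid(Width: int, Height: int, StartChar: str) -> list[str]:
--     """Generate a grid of characters with specified width and height"""
--     StartCode = ord(StartChar)
--     AllChars = [chr(StartCode + i) for i in range(Width * Height)]
--
--     # Split into rows and join characters
--     Grid = []
--     for Row in range(Height):
--         Start = Row * Width
--         End = Start + Width
--         RowChars = AllChars[Start:End]
--
--         # Fill remaining space with empty strings if needed
--         while len(RowChars) < Width:
--             RowChars.append("")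
--
--         # Join characters into single string
--         Grid.append("".join(RowChars))
--
--     return Grid
-- ===== SOURCE B (Python) =====
-- def GenerateCharacterGrid(Width: int, Height: int, StartChar: str) -> list[str]:
--     """Generate a grid of characters with specified width and height"""
--     StartCode = ord(StartChar)
--     return ["".join(chr(StartCode + Row * Width + Col) for Col in range(Width))
--             for Row in range(Height)]
-- ===== Notes on version B (the rewrite author's own statement) =====
-- stated objective: simpler
-- what changed: B computes each row's characters directly from Row*Width+Col index arithmetic in one nested comprehension, instead of A's two-pass structure that materializes the full flat character list, slices it per row, and runs a dead padding loop.
-- outside the precondition, e.g. on GenerateCharacterGrid(1114113, 1, ' '): A raises ValueError, B raises ValueError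
import Mathlib
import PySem

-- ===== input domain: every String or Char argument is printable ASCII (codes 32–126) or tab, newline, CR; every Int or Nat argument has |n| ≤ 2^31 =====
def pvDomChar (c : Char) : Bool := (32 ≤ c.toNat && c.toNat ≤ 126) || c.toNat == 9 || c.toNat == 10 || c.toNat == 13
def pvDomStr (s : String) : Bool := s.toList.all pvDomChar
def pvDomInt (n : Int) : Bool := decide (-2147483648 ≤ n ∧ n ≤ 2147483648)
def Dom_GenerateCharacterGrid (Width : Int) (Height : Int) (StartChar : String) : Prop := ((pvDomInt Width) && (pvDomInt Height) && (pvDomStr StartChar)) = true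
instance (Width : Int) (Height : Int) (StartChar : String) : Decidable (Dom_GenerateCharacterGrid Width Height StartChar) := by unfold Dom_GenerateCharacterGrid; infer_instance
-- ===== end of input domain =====

-- B replaces A's two-pass "build flat char list, slice per row, dead padding loop" with
-- direct per-row index arithmetic (objective: simpler). Equal return value on Pre_.

-- ===== PORT A =====
-- the 'while len(RowChars) < Width: RowChars.append("")' loop: fuel = the number of
-- remaining iterations (w - len, clamped at 0), so the recursion is structural
def pvPadLoop (fuel : Nat) (xs : List String) : List String :=
  match fuel with
  | 0 => xs
  | n + 1 => pvPadLoop n (xs ++ [""])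

def GenerateCharacterGrid (Width : Int) (Height : Int) (StartChar : String) : List String :=
  match StartChar.toList with
  | [c] =>
    let StartCode : Int := c.toNat
    let AllChars : List String :=
      (PySem.List.pyRange 0 (Width * Height) 1).map
        (fun i => String.ofList [Char.ofNat (StartCode + i).toNat])
    (PySem.List.pyRange 0 Height 1).foldl
      (fun Grid Row =>
        let start := Row * Width
        let stop := start + Width
        let rowChars := PySem.List.slice AllChars (some start) (some stop)
        let rowChars := pvPadLoop (Width - rowChars.length).toNat rowChars
        Grid ++ [PySem.Str.join "" rowChars]) []
  | _ => []  -- ord(StartChar) raises TypeError; excluded by Pre_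

-- ===== PORT B =====
def GenerateCharacterGrid_alt (Width : Int) (Height : Int) (StartChar : String) : List String :=
  if StartChar.toList.length = 1 then
    let StartCode : Int := (StartChar.toList.headD ' ').toNat
    (PySem.List.pyRange 0 Height 1).map
      (fun Row => String.ofList ((PySem.List.pyRange 0 Width 1).map
        (fun Col => Char.ofNat (StartCode + Row * Width + Col).toNat)))
  else []  -- ord(StartChar) raises TypeError; excluded by Pre_

-- ===== PRECONDITION & SPEC =====
-- Pre_ excludes (a) StartChar not of length 1, where ord() raises TypeError; (b) grids whose
-- consecutive code range [StartCode, StartCode+W*H) would reach ≥ U+110000, where Python's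
-- chr() raises ValueError (in A and in B alike); and (c) grids whose code range meets the
-- lone-surrogate band U+D800..U+DFFF: there Python A returns a string of lone surrogates
-- (and Python B returns the identical string), but such a string is not a sequence of
-- Unicode scalar values and has no representation as a Lean String, so the value lies
-- outside the port's declared type and cannot be claimed here.
def Pre_GenerateCharacterGrid (Width : Int) (Height : Int) (StartChar : String) : Prop :=
  StartChar.toList.length = 1 ∧
    (Width * Height ≤ 0 ∨
      ((StartChar.toList.headD ' ').toNat : Int) + Width * Height ≤ 55296 ∨
      (57344 ≤ ((StartChar.toList.headD ' ').toNat : Int) ∧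
        ((StartChar.toList.headD ' ').toNat : Int) + Width * Height ≤ 1114112))
instance (Width : Int) (Height : Int) (StartChar : String) : Decidable (Pre_GenerateCharacterGrid Width Height StartChar) := by unfold Pre_GenerateCharacterGrid; infer_instance

def pvWitness_GenerateCharacterGrid : Int × Int × String := (3, 2, "a")

def Spec_GenerateCharacterGrid (Width : Int) (Height : Int) (StartChar : String) (out : List String) : Prop := out = GenerateCharacterGrid_alt Width Height StartChar
instance (Width : Int) (Height : Int) (StartChar : String) (out : List String) : Decidable (Spec_GenerateCharacterGrid Width Height StartChar out) := by unfold Spec_GenerateCharacterGrid; infer_instance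

-- ===== CLAIM (what is proved, stated in full; the proofs are below) =====
def Claim_equal_GenerateCharacterGrid : Prop := ∀ (Width : Int) (Height : Int) (StartChar : String), Dom_GenerateCharacterGrid Width Height StartChar → Pre_GenerateCharacterGrid Width Height StartChar → Spec_GenerateCharacterGrid Width Height StartChar (GenerateCharacterGrid Width Height StartChar)
-- ===== LEMMAS AND PROOFS =====

theorem pv_foldl_append (f : Int → String) (l : List Int) (init : List String) :
    l.foldl (fun g r => g ++ [f r]) init = init ++ l.map f := by
  induction l generalizing init with
  | nil => simp
  | cons x xs ih => simp [List.foldl, ih, List.append_assoc]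

theorem pv_join_singletons (cs : List Char) :
    PySem.Str.join "" (cs.map (fun c => String.ofList [c])) = String.ofList cs := by
  have h : (PySem.Str.join "" (cs.map (fun c => String.ofList [c]))).toList = cs := by
    rw [PySem.Str.toList_join]
    simp [List.map_map, Function.comp_def, PySem.Chars.join_nil_singletons]
  calc PySem.Str.join "" (cs.map (fun c => String.ofList [c]))
      = String.ofList (PySem.Str.join "" (cs.map (fun c => String.ofList [c]))).toList :=
        String.ofList_toList.symm
    _ = String.ofList cs := by rw [h]

theorem pv_join_singleton_map {β : Type} (cs : List β) (g : β → Char) :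
    PySem.Str.join "" (cs.map (fun x => String.ofList [g x])) = String.ofList (cs.map g) := by
  rw [show (fun x => String.ofList [g x]) = ((fun c => String.ofList [c]) ∘ g) from rfl]
  rw [← List.map_map]
  exact pv_join_singletons (cs.map g)

theorem pv_slice_nil (a b : Option Int) : PySem.List.slice ([] : List String) a b = [] := by
  cases a <;> cases b <;> simp [PySem.List.slice]

theorem pv_take_drop_map_range {α : Type} (f : Nat → α) (n d t : Nat) (h : d + t ≤ n) :
    (((List.range n).map f).drop d).take t = (List.range t).map (fun j => f (d + j)) := by
  apply List.ext_getElem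
  · simp; omega
  · intro i h1 h2; simp

theorem pv_pad_noop (W : Int) (xs : List String) (h : W ≤ (xs.length : Int)) :
    pvPadLoop (W - xs.length).toNat xs = xs := by
  have h0 : (W - (xs.length : Int)).toNat = 0 := by omega
  rw [h0]; rfl

theorem pv_range_int_zero (b : Int) (hb : b ≤ 0) : PySem.List.pyRange 0 b = [] := by
  rw [PySem.List.pyRange_one]
  have : (b - 0).toNat = 0 := by omega
  rw [this]; simp

-- ===== VERDICT (by name: the statement is the Claim_ definition above) =====
theorem GenerateCharacterGrid_spec : Claim_equal_GenerateCharacterGrid := by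
  intro W H s _ hpre
  obtain ⟨h1, _⟩ := hpre
  unfold Spec_GenerateCharacterGrid
  match hl : s.toList with
  | [] => rw [hl] at h1; simp at h1
  | _ :: _ :: _ => rw [hl] at h1; simp at h1
  | [c] =>
    simp only [GenerateCharacterGrid, GenerateCharacterGrid_alt, hl, List.length_cons,
      List.length_nil, List.headD_cons]
    rw [pv_foldl_append]
    rw [List.nil_append]
    apply List.map_congr_left
    intro r hr
    rw [PySem.List.mem_pyRange_one] at hr
    obtain ⟨hr0, hrH⟩ := hr
    by_cases hWpos : 0 < W
    · -- positive width: the slice is exactly one full row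
      have hrW0 : 0 ≤ r * W := mul_nonneg hr0 (le_of_lt hWpos)
      have hsum : (r + 1) * W ≤ H * W :=
        mul_le_mul_of_nonneg_right (by omega) (le_of_lt hWpos)
      have hle : r * W + W ≤ W * H := by nlinarith
      have hd : ((r * W).toNat : Int) = r * W := Int.toNat_of_nonneg hrW0
      have hbt : (r * W + W).toNat - (r * W).toNat = W.toNat := by omega
      rw [PySem.List.slice_toNat _ hrW0 (by omega)]
      rw [PySem.List.pyRange_one 0 (W * H), List.map_map]
      rw [hbt]
      rw [pv_take_drop_map_range _ _ _ _ (by omega)]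
      simp only [Function.comp_def]
      rw [pv_pad_noop _ _ (by simp)]
      rw [pv_join_singleton_map]
      rw [PySem.List.pyRange_one 0 W, List.map_map]
      have hW0 : (W - 0).toNat = W.toNat := by omega
      rw [hW0]
      congr 1
      apply List.map_congr_left
      intro j _
      simp only [Function.comp]
      congr 1
      omega
    · -- nonpositive width: every row is the empty string
      have hH : 0 < H := by omega
      have hWH : W * H ≤ 0 := mul_nonpos_iff.mpr (Or.inr ⟨by omega, by omega⟩)
      rw [pv_range_int_zero _ hWH, List.map_nil, pv_slice_nil]
      rw [pv_pad_noop _ _ (by simp; omega)]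
      rw [pv_range_int_zero _ (by omega), List.map_nil]
      decide
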